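-- pv_equiv track=rewrite | github.com/Ali9ranjbar/InstagramCrawler | preprocess/PersianPolarity.py | mention_remover
-- ===== SOURCE A (Python) =====
-- def mention_remover(sentance):
--     '''
--        :param Token: sentance
--        :return: remove mention sentance text
--     '''
--     rsentence = ''
--     charlist = list(sentance)
--     mentionflag = False
--     for i in range(len(charlist)):
--         if charlist[i] == '@':
--             mentionflag = True
--         if charlist[i] == ' ':
--             mentionflag = False
--         if not mentionflag:
--             rsentence = rsentence + charlist[i]
--     return rsentence
-- ===== SOURCE B (Python) =====
-- def mention_remover(sentance):
--     out = []
--     i = 0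
--     n = len(sentance)
--     while i < n:
--         if sentance[i] == '@':
--             i += 1
--             while i < n and sentance[i] != ' ':
--                 i += 1
--         else:
--             out.append(sentance[i])
--             i += 1
--     return ''.join(out)
-- ===== Notes on version B (the rewrite author's own statement) =====
-- stated objective: alternative
-- what changed: Replaces the flag-carrying per-character scan (a boolean mention flag tested and updated on every character) with a skip-ahead scan: an inner loop jumps past each whole mention token and other characters are copied into a list joined once at the end.
import Mathlib
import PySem

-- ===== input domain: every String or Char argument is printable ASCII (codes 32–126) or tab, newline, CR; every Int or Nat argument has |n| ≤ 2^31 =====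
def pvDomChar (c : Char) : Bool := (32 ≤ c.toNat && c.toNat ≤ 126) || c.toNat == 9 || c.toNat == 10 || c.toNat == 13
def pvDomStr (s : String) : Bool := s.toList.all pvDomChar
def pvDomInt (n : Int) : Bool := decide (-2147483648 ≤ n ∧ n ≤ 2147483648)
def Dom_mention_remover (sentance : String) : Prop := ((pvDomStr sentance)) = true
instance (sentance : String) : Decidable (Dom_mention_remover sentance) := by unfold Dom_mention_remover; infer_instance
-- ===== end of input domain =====

-- B replaces A's flag-carrying per-character scan with a skip-ahead scan that jumps past each mention token (alternative decomposition; agrees with A everywhere).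


-- ===== PORT A =====
-- state = (rsentence so far, mentionflag); one step of A's for-loop body
def mrStep (st : List Char × Bool) (c : Char) : List Char × Bool :=
  let flag1 := if c = '@' then true else st.2
  let flag2 := if c = ' ' then false else flag1
  (if flag2 then st.1 else st.1 ++ [c], flag2)

def mention_remover (sentance : String) : String :=
  String.ofList (sentance.toList.foldl mrStep ([], false)).1

-- ===== PORT B =====
-- skip-ahead scan: on '@' drop the rest of the mention token, otherwise copy the char
def mrSkip : List Char → List Char
  | [] => []
  | c :: rest =>
    if c = '@' then mrSkip (rest.dropWhile (fun d => d ≠ ' '))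
    else c :: mrSkip rest
termination_by l => l.length
decreasing_by
  · exact Nat.lt_succ_of_le (List.length_dropWhile_le _ _)
  · simp

def mention_remover_alt (sentance : String) : String :=
  String.ofList (mrSkip sentance.toList)

-- ===== PRECONDITION & SPEC =====
def Spec_mention_remover (sentance : String) (out : String) : Prop := out = mention_remover_alt sentance
instance (sentance : String) (out : String) : Decidable (Spec_mention_remover sentance out) := by unfold Spec_mention_remover; infer_instance

-- ===== CLAIM (what is proved, stated in full; the proofs are below) =====
def Claim_equal_mention_remover : Prop := ∀ (sentance : String), Dom_mention_remover sentance → Spec_mention_remover sentance (mention_remover sentance)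

-- ===== LEMMAS AND PROOFS =====
-- Loop invariant: A's fold from state (acc, flag) appends exactly what B's skip-scan
-- produces, where flag = true means the rest of the current mention is still to be skipped.
theorem mrLoop_eq (l : List Char) : ∀ (acc : List Char) (flag : Bool),
    (l.foldl mrStep (acc, flag)).1
      = acc ++ mrSkip (if flag then l.dropWhile (fun d => d ≠ ' ') else l) := by
  induction l with
  | nil => intro acc flag; cases flag <;> simp [mrSkip]
  | cons c rest ih =>
    intro acc flag
    by_cases hs : c = ' '
    · subst hs
      cases flag <;>
        simp [mrStep, mrSkip, List.dropWhile, ih, (by decide : ¬ (' ' : Char) = '@')]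
    · by_cases ha : c = '@'
      · subst ha
        cases flag <;>
          simp [mrStep, mrSkip, List.dropWhile, hs, ih]
      · cases flag <;> simp [mrStep, mrSkip, List.dropWhile, hs, ha, ih]

-- ===== VERDICT (by name: the statement is the Claim_ definition above) =====
theorem mention_remover_spec : Claim_equal_mention_remover := by
  intro s _
  unfold Spec_mention_remover mention_remover mention_remover_alt
  rw [mrLoop_eq s.toList [] false]
  simp
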